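-- pv_equiv track=rewrite | github.com/felipeoes/PSG2 | QUESTIONS_GENERATION/calculate_statistics.py | get_subfolders_of_folder
-- ===== SOURCE A (Python) =====
-- def get_subfolders_of_folder(folder_to_search, all_folders):
--     """
--     Yield subfolders of the folder-to-search, and then subsubfolders etc. Must be called by an iterator.
--     :param all_folders: The dictionary returned by :meth:`get_all_folders_in-drive`.
--     """
--     temp_list = [
--         k for k, v in all_folders.items() if v == folder_to_search
--     ]  # Get all subfolders
--     for sub_folder in temp_list:  # For each subfolder...
--         yield sub_folder  # Return it
--         yield from get_subfolders_of_folder(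
--             sub_folder, all_folders
--         )  # Get subsubfolders etc
-- ===== SOURCE B (Python) =====
-- def get_subfolders_of_folder(folder_to_search, all_folders):
--     """Same traversal as the original, but the parent->children adjacency is
--     built once and the DFS runs on an explicit stack instead of recursive
--     re-filtering of the whole dict at every node."""
--     children = {}
--     for k, v in all_folders.items():
--         children.setdefault(v, []).append(k)
--     stack = list(reversed(children.get(folder_to_search, [])))
--     while stack:
--         folder = stack.pop()
--         yield folder
--         for c in reversed(children.get(folder, [])):
--             stack.append(c)
-- ===== Notes on version B (the rewrite author's own statement) =====
-- stated objective: alternative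
-- what changed: B builds the parent->children adjacency dict in one pass and runs the DFS on an explicit stack, instead of A's recursive generator that re-filters the entire dict at every visited node.
import Mathlib
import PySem

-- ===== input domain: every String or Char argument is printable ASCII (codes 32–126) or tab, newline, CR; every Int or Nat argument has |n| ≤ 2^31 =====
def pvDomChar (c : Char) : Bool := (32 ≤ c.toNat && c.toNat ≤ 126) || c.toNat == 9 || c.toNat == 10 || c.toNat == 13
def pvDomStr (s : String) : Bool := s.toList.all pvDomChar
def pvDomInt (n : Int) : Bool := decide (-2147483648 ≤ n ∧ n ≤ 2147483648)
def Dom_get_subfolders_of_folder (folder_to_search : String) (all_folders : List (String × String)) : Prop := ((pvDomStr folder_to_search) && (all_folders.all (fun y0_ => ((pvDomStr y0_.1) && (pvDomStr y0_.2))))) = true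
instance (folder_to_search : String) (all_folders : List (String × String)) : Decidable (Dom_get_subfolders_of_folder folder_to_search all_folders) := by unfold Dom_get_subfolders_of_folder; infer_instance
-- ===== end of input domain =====

-- B precomputes the parent→children adjacency dict once and runs an explicit-stack DFS,
-- instead of A's recursive generator that re-filters the whole dict at every visited node.
-- Both Pythons are generators; equivalence is about the yielded sequence, materialised as a list.

-- ===== PORT A =====
-- Fuel is a totality guard only: on Pre_ inputs (acyclic parent chains, distinct keys)
-- the recursion depth is at most all_folders.length + 1, so the guard never fires.
def pvGoA (all : List (String × String)) : Nat → String → List String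
  | 0, _ => []
  | f + 1, folder_to_search =>
    let temp_list := (all.filter (fun kv => kv.2 == folder_to_search)).map Prod.fst
    temp_list.flatMap (fun sub_folder => sub_folder :: pvGoA all f sub_folder)

def get_subfolders_of_folder (folder_to_search : String) (all_folders : List (String × String)) : List String :=
  pvGoA all_folders (all_folders.length + 1) folder_to_search

-- ===== PORT B =====
-- children = {}; for k, v in all_folders.items(): children.setdefault(v, []).append(k)
def pvChildMap (all : List (String × String)) : PySem.Dict String (List String) :=
  all.foldl (fun d kv => d.insert kv.2 (d.getD kv.2 [] ++ [kv.1])) PySem.Dict.empty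

-- The Python stack holds its top at the END (list.pop()); here the list holds the top at the
-- HEAD, so 'pop then push reversed children' becomes 'children ++ rest'. The fuel is a
-- totality guard only — the loop stops when the stack empties, and on Pre_ inputs the
-- number of iterations is bounded by the guard (proved below).
def pvLoopB (c : PySem.Dict String (List String)) : Nat → List String → List String → List String
  | 0, _, acc => acc
  | _ + 1, [], acc => acc
  | f + 1, x :: rest, acc => pvLoopB c f (c.getD x [] ++ rest) (acc ++ [x])

def get_subfolders_of_folder_alt (folder_to_search : String) (all_folders : List (String × String)) : List String :=
  let c := pvChildMap all_folders
  pvLoopB c ((all_folders.length + 1) ^ (all_folders.length + 2)) (c.getD folder_to_search []) []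

-- ===== PRECONDITION & SPEC =====
-- one step up the parent chain (lookup of a key's parent; none when not a key)
def pvParentStep (all : List (String × String)) : Option String → Option String :=
  fun o => o.bind (fun x => all.lookup x)

-- Pre_ excludes (a) association lists with duplicate keys — the Python dict argument cannot
-- represent them, so the list form is ambiguous — and (b) inputs whose folder_to_search lies on
-- a parent cycle of the map, exactly the inputs on which A's recursive generator never
-- finishes when consumed.
def Pre_get_subfolders_of_folder (folder_to_search : String) (all_folders : List (String × String)) : Prop :=
  (all_folders.map Prod.fst).Nodup ∧
  ∀ i ∈ List.range' 1 (all_folders.length + 1),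
    (pvParentStep all_folders)^[i] (some folder_to_search) ≠ some folder_to_search

instance (folder_to_search : String) (all_folders : List (String × String)) : Decidable (Pre_get_subfolders_of_folder folder_to_search all_folders) := by
  unfold Pre_get_subfolders_of_folder; infer_instance

def pvWitness_get_subfolders_of_folder : String × (List (String × String)) :=
  ("root", [("a", "root"), ("b", "a"), ("c", "root")])

def Spec_get_subfolders_of_folder (folder_to_search : String) (all_folders : List (String × String)) (out : List String) : Prop := out = get_subfolders_of_folder_alt folder_to_search all_folders
instance (folder_to_search : String) (all_folders : List (String × String)) (out : List String) : Decidable (Spec_get_subfolders_of_folder folder_to_search all_folders out) := by unfold Spec_get_subfolders_of_folder; infer_instance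

-- ===== CLAIM (what is proved, stated in full; the proofs are below) =====
def Claim_equal_get_subfolders_of_folder : Prop := ∀ (folder_to_search : String) (all_folders : List (String × String)), Dom_get_subfolders_of_folder folder_to_search all_folders → Pre_get_subfolders_of_folder folder_to_search all_folders → Spec_get_subfolders_of_folder folder_to_search all_folders (get_subfolders_of_folder folder_to_search all_folders)

-- ===== LEMMAS AND PROOFS =====

-- A's per-node "temp_list": the children of x
def pvChl (all : List (String × String)) (x : String) : List String :=
  (all.filter (fun kv => kv.2 == x)).map Prod.fst

theorem pvGoA_succ (all : List (String × String)) (f : Nat) (x : String) :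
    pvGoA all (f + 1) x = (pvChl all x).flatMap (fun s => s :: pvGoA all f s) := rfl

-- d is the exact number of parent steps from x up to the folder being searched
def pvMinReach (all : List (String × String)) (folder : String) (d : Nat) (x : String) : Prop :=
  (pvParentStep all)^[d] (some x) = some folder ∧
  ∀ d' < d, (pvParentStep all)^[d'] (some x) ≠ some folder

theorem pvStep_none (all : List (String × String)) (m : Nat) :
    (pvParentStep all)^[m] none = none :=
  Function.iterate_fixed rfl m

theorem pvLookup_none (all : List (String × String)) (x : String)
    (hx : x ∉ all.map Prod.fst) : all.lookup x = none := by
  induction all with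
  | nil => rfl
  | cons kv t ih =>
    simp only [List.map_cons, List.mem_cons, not_or] at hx
    have : (x == kv.1) = false := by
      cases h : x == kv.1
      · rfl
      · exact absurd (beq_iff_eq.mp h) hx.1
    simp [List.lookup, this, ih hx.2]

theorem pvLookup_mem (all : List (String × String)) (x : String)
    (hx : all.lookup x ≠ none) : x ∈ all.map Prod.fst := by
  by_contra hmem
  exact hx (pvLookup_none all x hmem)

theorem pvLookup_child (all : List (String × String)) (k x : String)
    (hnd : (all.map Prod.fst).Nodup) (hmem : (k, x) ∈ all) : all.lookup k = some x := by
  induction all with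
  | nil => simp at hmem
  | cons kv t ih =>
    simp only [List.map_cons, List.nodup_cons] at hnd
    rcases List.mem_cons.mp hmem with h | h
    · rw [← h]; simp [List.lookup]
    · have hk : k ∈ t.map Prod.fst := List.mem_map.mpr ⟨(k, x), h, rfl⟩
      have : (k == kv.1) = false := by
        cases hb : k == kv.1
        · rfl
        · exact absurd (beq_iff_eq.mp hb ▸ hk) hnd.1
      simp [List.lookup, this, ih hnd.2 h]

theorem pvChl_mem (all : List (String × String)) (x k : String)
    (h : k ∈ pvChl all x) : (k, x) ∈ all := by
  unfold pvChl at h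
  rcases List.mem_map.mp h with ⟨kv, hkv, hk⟩
  rcases List.mem_filter.mp hkv with ⟨hmem, hv⟩
  have hx : kv.2 = x := beq_iff_eq.mp hv
  have : kv = (k, x) := by
    cases kv; simp_all
  rwa [this] at hmem

-- a chain value that still has d more steps to run is `some` of a key (or the final target)
theorem pvChain_isKey (all : List (String × String)) {x : String} {t u : Nat}
    (htu : t < u) {o : Option String}
    (hu : (pvParentStep all)^[u] (some x) ≠ none)
    (ht : (pvParentStep all)^[t] (some x) = o) :
    ∃ y, o = some y ∧ y ∈ all.map Prod.fst := by
  have hnext : (pvParentStep all)^[t + 1] (some x) ≠ none := by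
    intro hnone
    have : u = (u - (t + 1)) + (t + 1) := by omega
    rw [this, Function.iterate_add_apply, hnone, pvStep_none] at hu
    exact hu rfl
  rw [Function.iterate_succ_apply', ht] at hnext
  cases o with
  | none => exact absurd rfl hnext
  | some y =>
    refine ⟨y, rfl, pvLookup_mem all y ?_⟩
    intro hl
    exact hnext (by simp [pvParentStep, hl])

-- pigeonhole: a minimal chain from x to the target visits pairwise distinct values
theorem pvReach_le (all : List (String × String)) (folder : String) {d : Nat} {x : String}
    (h : pvMinReach all folder d x) : d ≤ all.length := by
  classical
  have key : ∀ t u : Nat, t < u → u ≤ d →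
      (pvParentStep all)^[t] (some x) = (pvParentStep all)^[u] (some x) → False := by
    intro t u hlt hud htu
    have h1 : (pvParentStep all)^[d - u] ((pvParentStep all)^[u] (some x)) = some folder := by
      have heq : d = (d - u) + u := by omega
      have hd := h.1
      rw [heq, Function.iterate_add_apply] at hd
      exact hd
    have h2 : (pvParentStep all)^[(d - u) + t] (some x) = some folder := by
      rw [Function.iterate_add_apply, htu]
      exact h1
    exact h.2 ((d - u) + t) (by omega) h2
  have hinj : Set.InjOn (fun t => (pvParentStep all)^[t] (some x)) (Finset.range (d + 1)) := by
    intro t ht u hu htu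
    simp only [Finset.coe_range, Set.mem_Iio] at ht hu
    simp only at htu
    by_contra hne
    rcases Nat.lt_or_ge t u with hlt | hge
    · exact key t u hlt (by omega) htu
    · exact key u t (by omega) (by omega) htu.symm
  have himg : ∀ t ∈ Finset.range (d + 1),
      (pvParentStep all)^[t] (some x) ∈ ((folder :: all.map Prod.fst).map Option.some).toFinset := by
    intro t ht
    simp only [Finset.mem_range] at ht
    rcases Nat.lt_or_ge t d with hlt | hge
    · have hu : (pvParentStep all)^[d] (some x) ≠ none := by
        rw [h.1]; exact Option.some_ne_none _
      obtain ⟨y, hy, hymem⟩ :=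
        pvChain_isKey all hlt hu (rfl : (pvParentStep all)^[t] (some x) = _)
      rw [hy]
      exact List.mem_toFinset.mpr (List.mem_map.mpr ⟨y, List.mem_cons_of_mem _ hymem, rfl⟩)
    · have hts : t = d := by omega
      rw [hts, h.1]
      exact List.mem_toFinset.mpr (List.mem_map.mpr ⟨folder, List.mem_cons_self .., rfl⟩)
  have hcard := Finset.card_le_card_of_injOn _ himg hinj
  have h1 : (Finset.range (d + 1)).card = d + 1 := Finset.card_range _
  have h2 : ((folder :: all.map Prod.fst).map Option.some).toFinset.card
      ≤ all.length + 1 := by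
    calc ((folder :: all.map Prod.fst).map Option.some).toFinset.card
        ≤ ((folder :: all.map Prod.fst).map Option.some).length := List.toFinset_card_le _
      _ = all.length + 1 := by simp
  omega

-- the bounded no-cycle condition of Pre_ yields the unbounded one (a minimal cycle is short)
theorem pvNoCycle_all (all : List (String × String)) (folder : String)
    (hcyc : ∀ i ∈ List.range' 1 (all.length + 1),
      (pvParentStep all)^[i] (some folder) ≠ some folder) :
    ∀ i, 1 ≤ i → (pvParentStep all)^[i] (some folder) ≠ some folder := by
  classical
  intro i hi hEq
  have hex : ∃ c, 1 ≤ c ∧ (pvParentStep all)^[c] (some folder) = some folder := ⟨i, hi, hEq⟩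
  obtain ⟨hc1, hcEq⟩ := Nat.find_spec hex
  have key : ∀ t u : Nat, t < u → u < Nat.find hex →
      (pvParentStep all)^[t] (some folder) = (pvParentStep all)^[u] (some folder) → False := by
    intro t u hlt hult htu
    have h1 : (pvParentStep all)^[Nat.find hex - u] ((pvParentStep all)^[u] (some folder))
        = some folder := by
      have heq : Nat.find hex = (Nat.find hex - u) + u := by omega
      have hd := hcEq
      rw [heq, Function.iterate_add_apply] at hd
      exact hd
    have h2 : (pvParentStep all)^[(Nat.find hex - u) + t] (some folder) = some folder := by
      rw [Function.iterate_add_apply, htu]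
      exact h1
    exact Nat.find_min hex (m := (Nat.find hex - u) + t) (by omega) ⟨by omega, h2⟩
  have hinj : Set.InjOn (fun t => (pvParentStep all)^[t] (some folder))
      (Finset.range (Nat.find hex)) := by
    intro t ht u hu htu
    simp only [Finset.coe_range, Set.mem_Iio] at ht hu
    simp only at htu
    by_contra hne
    rcases Nat.lt_or_ge t u with hlt | hge
    · exact key t u hlt hu htu
    · exact key u t (by omega) ht htu.symm
  have himg : ∀ t ∈ Finset.range (Nat.find hex),
      (pvParentStep all)^[t] (some folder) ∈ ((all.map Prod.fst).map Option.some).toFinset := by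
    intro t ht
    simp only [Finset.mem_range] at ht
    have hu : (pvParentStep all)^[Nat.find hex] (some folder) ≠ none := by
      rw [hcEq]; exact Option.some_ne_none _
    obtain ⟨y, hy, hymem⟩ :=
      pvChain_isKey all ht hu (rfl : (pvParentStep all)^[t] (some folder) = _)
    rw [hy]
    exact List.mem_toFinset.mpr (List.mem_map.mpr ⟨y, hymem, rfl⟩)
  have hcard := Finset.card_le_card_of_injOn _ himg hinj
  have h1 : (Finset.range (Nat.find hex)).card = Nat.find hex := Finset.card_range _
  have h2 : ((all.map Prod.fst).map Option.some).toFinset.card ≤ all.length := by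
    calc ((all.map Prod.fst).map Option.some).toFinset.card
        ≤ ((all.map Prod.fst).map Option.some).length := List.toFinset_card_le _
      _ = all.length := by simp
  have hle : Nat.find hex ≤ all.length := by omega
  exact hcyc (Nat.find hex) (by simp only [List.mem_range'_1]; omega) hcEq

theorem pvChild_minReach (all : List (String × String)) (folder : String)
    (hnd : (all.map Prod.fst).Nodup)
    (hcycA : ∀ i, 1 ≤ i → (pvParentStep all)^[i] (some folder) ≠ some folder)
    {d : Nat} {x k : String}
    (hme : pvMinReach all folder d x) (hmem : (k, x) ∈ all) :
    pvMinReach all folder (d + 1) k := by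
  have hstep : pvParentStep all (some k) = some x := by
    simp [pvParentStep, pvLookup_child all k x hnd hmem]
  have hreach : (pvParentStep all)^[d + 1] (some k) = some folder := by
    rw [Function.iterate_succ_apply, hstep]; exact hme.1
  refine ⟨hreach, ?_⟩
  intro d' hd'
  cases d' with
  | zero =>
    simp only [Function.iterate_zero, id_eq]
    intro hk
    have hkf : k = folder := by injection hk
    subst hkf
    exact hcycA (d + 1) (by omega) hreach
  | succ e =>
    rw [Function.iterate_succ_apply, hstep]
    exact hme.2 e (by omega)

theorem pvStable (all : List (String × String)) (folder : String)
    (hnd : (all.map Prod.fst).Nodup)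
    (hcycA : ∀ i, 1 ≤ i → (pvParentStep all)^[i] (some folder) ≠ some folder) :
    ∀ (m d : Nat) (x : String) (f f' : Nat), pvMinReach all folder d x →
      all.length + 1 - d ≤ f → all.length + 1 - d ≤ f' → all.length + 1 - d ≤ m →
      pvGoA all f x = pvGoA all f' x := by
  intro m
  induction m with
  | zero =>
    intro d x f f' hme hf hf' hm
    have := pvReach_le all folder hme
    omega
  | succ m ih =>
    intro d x f f' hme hf hf' hm
    have hdle := pvReach_le all folder hme
    obtain ⟨fa, rfl⟩ : ∃ fa, f = fa + 1 := ⟨f - 1, by omega⟩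
    obtain ⟨fb, rfl⟩ : ∃ fb, f' = fb + 1 := ⟨f' - 1, by omega⟩
    rw [pvGoA_succ, pvGoA_succ]
    rw [List.flatMap_def, List.flatMap_def]
    congr 1
    apply List.map_congr_left
    intro k hk
    have hmem : (k, x) ∈ all := pvChl_mem all x k hk
    have hme' : pvMinReach all folder (d + 1) k := pvChild_minReach all folder hnd hcycA hme hmem
    have hdle' := pvReach_le all folder hme'
    have := ih (d + 1) k fa fb hme' (by omega) (by omega) (by omega)
    rw [this]

theorem pvUnfold1 (all : List (String × String)) (folder : String)
    (hnd : (all.map Prod.fst).Nodup)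
    (hcycA : ∀ i, 1 ≤ i → (pvParentStep all)^[i] (some folder) ≠ some folder)
    {d : Nat} {x : String} (hme : pvMinReach all folder d x) :
    pvGoA all (all.length + 1) x
      = (pvChl all x).flatMap (fun k => k :: pvGoA all (all.length + 1) k) := by
  rw [pvGoA_succ, List.flatMap_def, List.flatMap_def]
  congr 1
  apply List.map_congr_left
  intro k hk
  have hmem : (k, x) ∈ all := pvChl_mem all x k hk
  have hme' : pvMinReach all folder (d + 1) k := pvChild_minReach all folder hnd hcycA hme hmem
  have hdle' := pvReach_le all folder hme'
  have := pvStable all folder hnd hcycA (all.length + 1) (d + 1) k all.length (all.length + 1)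
    hme' (by omega) (by omega) (by omega)
  rw [this]

theorem pvChl_length_le (all : List (String × String)) (x : String) :
    (pvChl all x).length ≤ all.length := by
  unfold pvChl
  rw [List.length_map]
  exact List.length_filter_le _ _

theorem pvGrowth (all : List (String × String)) :
    ∀ (f : Nat) (x : String), (pvGoA all f x).length ≤ (all.length + 1) ^ f - 1 := by
  intro f
  induction f with
  | zero => intro x; simp [pvGoA]
  | succ f ih =>
    intro x
    rw [pvGoA_succ, List.length_flatMap]
    have hbound : ∀ y ∈ (pvChl all x).map (fun s => (s :: pvGoA all f s).length),
        y ≤ (all.length + 1) ^ f := by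
      intro y hy
      rcases List.mem_map.mp hy with ⟨s, _, rfl⟩
      have := ih s
      have hpow : 1 ≤ (all.length + 1) ^ f := Nat.one_le_pow _ _ (by omega)
      simp only [List.length_cons]
      omega
    have hsum := List.sum_le_card_nsmul _ _ hbound
    rw [List.length_map] at hsum
    have hcard := pvChl_length_le all x
    have hpow : 1 ≤ (all.length + 1) ^ f := Nat.one_le_pow _ _ (by omega)
    have hmul : (pvChl all x).length * (all.length + 1) ^ f
        ≤ all.length * (all.length + 1) ^ f := Nat.mul_le_mul_right _ hcard
    have hstep : all.length * (all.length + 1) ^ f ≤ (all.length + 1) ^ (f + 1) - 1 := by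
      have : (all.length + 1) ^ (f + 1) = all.length * (all.length + 1) ^ f + (all.length + 1) ^ f := by
        ring
      omega
    simp only [smul_eq_mul] at hsum
    omega

theorem pvChildMap_getD :
    ∀ (l : List (String × String)) (d : PySem.Dict String (List String)) (x : String),
      (l.foldl (fun d kv => d.insert kv.2 (d.getD kv.2 [] ++ [kv.1])) d).getD x []
        = d.getD x [] ++ pvChl l x := by
  intro l
  induction l with
  | nil => intro d x; simp [pvChl]
  | cons kv t ih =>
    intro d x
    rw [List.foldl_cons, ih]
    have hchl : pvChl (kv :: t) x
        = (if kv.2 = x then [kv.1] else []) ++ pvChl t x := by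
      unfold pvChl
      by_cases h : kv.2 = x
      · simp [h]
      · have hb : (kv.2 == x) = false := beq_eq_false_iff_ne.mpr h
        simp [hb, h]
    rw [hchl, PySem.Dict.getD_insert]
    by_cases h : x = kv.2
    · simp [h, List.append_assoc]
    · have h' : ¬ kv.2 = x := fun hh => h hh.symm
      simp [h, h']

-- loop accounting: one fuel unit is spent per yielded node
def pvW (all : List (String × String)) (stack : List String) : Nat :=
  (stack.map (fun x => (pvGoA all (all.length + 1) x).length + 1)).sum

theorem pvW_chl (all : List (String × String)) (folder : String)
    (hnd : (all.map Prod.fst).Nodup)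
    (hcycA : ∀ i, 1 ≤ i → (pvParentStep all)^[i] (some folder) ≠ some folder)
    {d : Nat} {x : String} (hme : pvMinReach all folder d x) :
    pvW all (pvChl all x) = (pvGoA all (all.length + 1) x).length := by
  unfold pvW
  rw [pvUnfold1 all folder hnd hcycA hme, List.length_flatMap]
  simp

theorem pvLoop_lemma (all : List (String × String)) (folder : String)
    (hnd : (all.map Prod.fst).Nodup)
    (hcycA : ∀ i, 1 ≤ i → (pvParentStep all)^[i] (some folder) ≠ some folder) :
    ∀ (f : Nat) (stack acc : List String),
      (∀ x ∈ stack, ∃ d, pvMinReach all folder d x) → pvW all stack ≤ f →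
      pvLoopB (pvChildMap all) f stack acc
        = acc ++ stack.flatMap (fun x => x :: pvGoA all (all.length + 1) x) := by
  intro f
  induction f with
  | zero =>
    intro stack acc hval hw
    cases stack with
    | nil => simp [pvLoopB]
    | cons x rest =>
      exfalso
      unfold pvW at hw
      simp only [List.map_cons, List.sum_cons] at hw
      omega
  | succ f ih =>
    intro stack acc hval hw
    cases stack with
    | nil => simp [pvLoopB]
    | cons x rest =>
      obtain ⟨d, hme⟩ := hval x (List.mem_cons_self ..)
      show pvLoopB (pvChildMap all) f ((pvChildMap all).getD x [] ++ rest) (acc ++ [x]) = _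
      have hgetD : (pvChildMap all).getD x [] = pvChl all x := by
        unfold pvChildMap
        rw [pvChildMap_getD]
        simp
      rw [hgetD]
      have hval' : ∀ y ∈ pvChl all x ++ rest, ∃ d', pvMinReach all folder d' y := by
        intro y hy
        rcases List.mem_append.mp hy with hy | hy
        · exact ⟨d + 1, pvChild_minReach all folder hnd hcycA hme (pvChl_mem all x y hy)⟩
        · exact hval y (List.mem_cons_of_mem _ hy)
      have hwx := pvW_chl all folder hnd hcycA hme
      have hw' : pvW all (pvChl all x ++ rest) ≤ f := by
        unfold pvW at hw ⊢
        rw [List.map_append, List.sum_append]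
        unfold pvW at hwx
        simp only [List.map_cons, List.sum_cons] at hw
        omega
      rw [ih (pvChl all x ++ rest) (acc ++ [x]) hval' hw']
      rw [List.flatMap_cons, List.flatMap_append, pvUnfold1 all folder hnd hcycA hme]
      simp [List.append_assoc]

-- ===== VERDICT (by name: the statement is the Claim_ definition above) =====
theorem get_subfolders_of_folder_spec : Claim_equal_get_subfolders_of_folder := by
  intro folder all _ hpre
  obtain ⟨hnd, hcyc⟩ := hpre
  have hcycA := pvNoCycle_all all folder hcyc
  unfold Spec_get_subfolders_of_folder get_subfolders_of_folder get_subfolders_of_folder_alt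
  have hme : pvMinReach all folder 0 folder :=
    ⟨rfl, fun d' hd' => absurd hd' (Nat.not_lt_zero _)⟩
  have hgetD : (pvChildMap all).getD folder [] = pvChl all folder := by
    unfold pvChildMap
    rw [pvChildMap_getD]
    simp
  have hval : ∀ y ∈ pvChl all folder, ∃ d', pvMinReach all folder d' y := fun y hy =>
    ⟨1, pvChild_minReach all folder hnd hcycA hme (pvChl_mem all folder y hy)⟩
  have hwx := pvW_chl all folder hnd hcycA hme
  have hwle : pvW all (pvChl all folder) ≤ (all.length + 1) ^ (all.length + 2) := by
    rw [hwx]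
    have h1 := pvGrowth all (all.length + 1) folder
    have h2 : (all.length + 1) ^ (all.length + 1) ≤ (all.length + 1) ^ (all.length + 2) :=
      Nat.pow_le_pow_right (by omega) (by omega)
    omega
  show pvGoA all (all.length + 1) folder
      = pvLoopB (pvChildMap all) ((all.length + 1) ^ (all.length + 2)) ((pvChildMap all).getD folder []) []
  rw [hgetD, pvLoop_lemma all folder hnd hcycA _ _ _ hval hwle, List.nil_append,
    pvUnfold1 all folder hnd hcycA hme]
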